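-- pv_equiv track=rewrite | github.com/someone-is-here/OACM | Lab3/main.py | create_q_matrix
-- ===== SOURCE A (Python) =====
-- def create_q_matrix(vector, index):
--     identity_matrix = []
--
--     for i in range(len(vector)):
--         row = []
--
--         for j in range(len(vector)):
--             if j == index:
--                 row.append(vector[i])
--             elif i == j:
--                 row.append(1)
--             else:
--                 row.append(0)
--
--         identity_matrix.append(row)
--
--     return identity_matrix
-- ===== SOURCE B (Python) =====
-- def create_q_matrix(vector, index):
--     n = len(vector)
--     # phase 1: plain identity matrix
--     matrix = [[1 if i == j else 0 for j in range(n)] for i in range(n)]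
--     # phase 2: overwrite the target column when it exists
--     if 0 <= index < n:
--         matrix = [row[:index] + [vector[i]] + row[index + 1:]
--                   for i, row in enumerate(matrix)]
--     return matrix
-- ===== Notes on version B (the rewrite author's own statement) =====
-- stated objective: alternative
-- what changed: A fills every cell with one interleaved if/elif/else in a single nested pass; B first builds the plain identity matrix and then, in a separate phase, replaces the target column (only when the column index is inside the matrix) by splicing vector[i] into each row.
import Mathlib
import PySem

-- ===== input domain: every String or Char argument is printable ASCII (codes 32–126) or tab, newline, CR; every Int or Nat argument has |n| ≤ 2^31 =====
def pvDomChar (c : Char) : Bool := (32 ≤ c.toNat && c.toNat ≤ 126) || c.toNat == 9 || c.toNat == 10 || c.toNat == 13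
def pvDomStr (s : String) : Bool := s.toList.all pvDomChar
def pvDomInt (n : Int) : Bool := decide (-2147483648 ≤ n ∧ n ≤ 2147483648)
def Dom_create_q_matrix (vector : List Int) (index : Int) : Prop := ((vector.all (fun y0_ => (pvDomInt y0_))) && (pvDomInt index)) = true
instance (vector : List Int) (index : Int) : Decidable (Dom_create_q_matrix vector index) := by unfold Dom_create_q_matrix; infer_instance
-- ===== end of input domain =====

-- B builds the plain identity matrix first and then, in a separate phase, splices the
-- vector into the target column (when that column exists); A fills every cell in one
-- interleaved if/elif/else nested pass. Same cost; different decomposition.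

-- ===== PORT A =====
-- one nested pass: cell (i,j) is vector[i] if j == index, else 1 if i == j, else 0
def create_q_matrix (vector : List Int) (index : Int) : List (List Int) :=
  (List.range vector.length).foldl (fun identity_matrix (i : Nat) =>
    identity_matrix ++
      [ (List.range vector.length).foldl (fun row (j : Nat) =>
          row ++ [ if (j : Int) = index then PySem.List.pyGetD vector (i : Int) 0
                   else if i = j then 1 else 0 ]) [] ]) []

-- ===== PORT B =====
-- phase 1: identity matrix; phase 2: splice vector into column `index` when 0 ≤ index < n
def create_q_matrix_alt (vector : List Int) (index : Int) : List (List Int) :=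
  let n := vector.length
  let matrix := (List.range n).map (fun i =>
    (List.range n).map (fun j => if i = j then (1 : Int) else 0))
  if 0 ≤ index ∧ index < (n : Int) then
    (PySem.List.enumerate matrix 0).map (fun p =>
      PySem.List.slice p.2 none (some index)
        ++ [PySem.List.pyGetD vector p.1 0]
        ++ PySem.List.slice p.2 (some (index + 1)) none)
  else matrix

-- ===== PRECONDITION & SPEC =====
def Spec_create_q_matrix (vector : List Int) (index : Int) (out : List (List Int)) : Prop := out = create_q_matrix_alt vector index
instance (vector : List Int) (index : Int) (out : List (List Int)) : Decidable (Spec_create_q_matrix vector index out) := by unfold Spec_create_q_matrix; infer_instance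

-- ===== CLAIM (what is proved, stated in full; the proofs are below) =====
def Claim_equal_create_q_matrix : Prop := ∀ (vector : List Int) (index : Int), Dom_create_q_matrix vector index → Spec_create_q_matrix vector index (create_q_matrix vector index)

-- ===== LEMMAS AND PROOFS =====

-- A's port as a map over rows of maps over cells
theorem create_q_matrix_eq_map (vector : List Int) (index : Int) :
    create_q_matrix vector index =
      (List.range vector.length).map (fun (i : Nat) =>
        (List.range vector.length).map (fun (j : Nat) =>
          if (j : Int) = index then PySem.List.pyGetD vector (i : Int) 0
          else if i = j then 1 else 0)) := by
  unfold create_q_matrix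
  rw [PySem.List.foldl_append_singleton_eq_map]
  refine List.map_congr_left fun i _ => ?_
  rw [PySem.List.foldl_append_singleton_eq_map]; simp

-- replacing column k of an n×n row built over `range n` = splicing the new value at k
theorem splice_map_range {α : Type} (f g : Nat → α) (n k : Nat) (hk : k < n)
    (hagree : ∀ j, j < n → j ≠ k → f j = g j) :
    (List.range n).map f =
      ((List.range n).map g).take k ++ [f k] ++ ((List.range n).map g).drop (k+1) := by
  have hmin : min k n = k := by omega
  apply List.ext_getElem
  · simp [hmin]; omega
  · intro m h1 h2
    have h1' : m < n := by simpa using h1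
    rcases lt_trichotomy m k with h|h|h
    · rw [List.getElem_append_left (by simp [hmin]; omega),
          List.getElem_append_left (by simp [hmin]; omega)]
      simp only [List.getElem_take, List.getElem_map, List.getElem_range]
      exact hagree m h1' (by omega)
    · subst h
      rw [List.getElem_append_left (by simp [hmin]),
          List.getElem_append_right (by simp [hmin])]
      simp [hmin]
    · rw [List.getElem_append_right (by simp [hmin]; omega)]
      simp only [List.length_append, List.length_take, List.length_map, List.length_range,
        List.length_cons, List.length_nil, hmin, List.getElem_drop, List.getElem_map,
        List.getElem_range]
      rw [hagree m h1' (by omega)]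
      congr 1
      omega

-- enumerating a row list built by map over range
theorem enumerate_map_range {α : Type} (f : Nat → α) (n : Nat) :
    PySem.List.enumerate ((List.range n).map f) 0 =
      (List.range n).map (fun (i : Nat) => ((i : Int), f i)) := by
  apply List.ext_getElem
  · simp [PySem.List.length_enumerate]
  · intro m h1 h2
    rw [PySem.List.getElem_enumerate]
    simp

-- ===== VERDICT (by name: the statement is the Claim_ definition above) =====
theorem create_q_matrix_spec : Claim_equal_create_q_matrix := by
  intro vector index _
  unfold Spec_create_q_matrix
  simp only [create_q_matrix_alt]
  rw [create_q_matrix_eq_map]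
  by_cases hin : 0 ≤ index ∧ index < (vector.length : Int)
  · rw [if_pos hin]
    obtain ⟨h0, hlt⟩ := hin
    have hk : index = (index.toNat : Int) := (Int.toNat_of_nonneg h0).symm
    have hkn : index.toNat < vector.length := by omega
    rw [enumerate_map_range, List.map_map]
    refine List.map_congr_left fun i hi => ?_
    have hi' : i < vector.length := List.mem_range.mp hi
    simp only [Function.comp]
    rw [hk, PySem.List.slice_to_natCast]
    have h1 : ((index.toNat : Int) + 1) = ((index.toNat + 1 : Nat) : Int) := by push_cast; ring
    rw [h1, PySem.List.slice_from_natCast]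
    have := splice_map_range
      (fun j => if (j : Int) = ((index.toNat : Int)) then PySem.List.pyGetD vector (i : Int) 0
                else if i = j then 1 else 0)
      (fun j => if i = j then (1 : Int) else 0)
      vector.length index.toNat hkn
      (fun j _ hj => by simp; intro h; exact absurd h (by omega))
    rw [this]
    simp
  · rw [if_neg hin]
    refine List.map_congr_left fun i hi => ?_
    refine List.map_congr_left fun j hj => ?_
    have hj' : j < vector.length := List.mem_range.mp hj
    rw [if_neg (by omega)]
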